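-- pv_equiv track=rewrite | github.com/CrossLangNV/C4C_term_extraction | src/annotations.py | get_paragraphs_index
-- ===== SOURCE A (Python) =====
-- from typing import List, Tuple
--
-- def get_paragraphs_index( text:str )->List[ Tuple[ int, int ] ]:
--
--     '''
--     Helper function to find offsets of the paragraphs in a string (paragraphs are considered blockes of sentences (text.strip( "\n" )) for which sentence.strip() is not None.
--
--     :param text: String. String, for instance results of tika parser.
--     :return: List[ Tuple[ int, int ] ]. List with offsets of the paragraphs.
--     '''
--
--
--     in_paragraph=False
--     paragraphs_index=[]
--     position=0
--     sentences=text.split( "\n" )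
--     for i, sentence in enumerate( sentences  ):
--
--         if sentence.strip():
--             if in_paragraph==False:
--                 #this means a new start
--                 #start_index=i
--                 start_position=position
--             in_paragraph=True
--             position+=( len(sentence)+1 ) #+1 to account for the "\n" (stripped via .split( "\n" ))
--         else:
--             #this means the paragraph has come to and end ( i.e. sentence only contains tabs, spaces... ):
--             if in_paragraph==True:
--                 #end_index=i
--                 paragraphs_index.append( ( start_position, position-1 ) )  #-1 because the "\n" should not be included in the paragraph
--             in_paragraph=False
--             position+=(len( sentence )+1) #+1 to account for the "\n" (stripped via .split( "\n" ))
--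
--         #still works if text ends with two or three sentences? TO DO check
--         if i==len( sentences )-1 and in_paragraph:
--             paragraphs_index.append( ( start_position, position-1 ) )
--
--     return paragraphs_index
-- ===== SOURCE B (Python) =====
-- from itertools import groupby
-- from typing import List, Tuple
--
-- def get_paragraphs_index(text: str) -> List[Tuple[int, int]]:
--     lines = text.split("\n")
--     # prefix offsets: P[i] = character offset of the start of line i
--     P = [0]
--     for line in lines:
--         P.append(P[-1] + len(line) + 1)
--     result = []
--     i = 0
--     for nonblank, run in groupby(lines, key=lambda s: bool(s.strip())):
--         k = sum(1 for _ in run)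
--         if nonblank:
--             result.append((P[i], P[i + k] - 1))
--         i += k
--     return result
-- ===== Notes on version B (the rewrite author's own statement) =====
-- stated objective: simpler
-- what changed: Replaces A's single-pass boolean state machine (in_paragraph flag, running position, special last-line check) by a prefix-offset table over the split lines plus an itertools.groupby grouping of consecutive blank/non-blank runs, emitting (P[a], P[b+1]-1) per non-blank run.
import Mathlib
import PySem

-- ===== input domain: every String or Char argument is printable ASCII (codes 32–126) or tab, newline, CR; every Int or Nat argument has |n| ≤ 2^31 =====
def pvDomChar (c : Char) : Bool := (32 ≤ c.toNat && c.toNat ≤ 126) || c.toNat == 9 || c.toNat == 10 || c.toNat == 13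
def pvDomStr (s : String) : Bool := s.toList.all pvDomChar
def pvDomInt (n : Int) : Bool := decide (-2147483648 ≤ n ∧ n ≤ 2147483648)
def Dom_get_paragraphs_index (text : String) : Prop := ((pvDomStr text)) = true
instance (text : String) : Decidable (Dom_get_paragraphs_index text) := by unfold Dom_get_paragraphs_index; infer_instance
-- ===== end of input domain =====

-- B replaces A's one-pass boolean/position state machine (with its special last-line check)
-- by a prefix-offset table plus an itertools.groupby grouping of consecutive blank/non-blank
-- lines; objective: simpler/alternative decomposition, same exact return value.

-- ===== PORT A =====
-- truthiness of line.strip(): the stripped line is non-empty (shared by both ports)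
def pvNonblank (s : List Char) : Bool := !((PySem.Chars.strip s).length == 0)

-- the loop of A: state (in_paragraph, start_position, position, paragraphs_index);
-- the trailing `if i == len(sentences)-1 and in_paragraph` check is `rest = []` here
def pvLoopA : List (List Char) → Bool → Int → Int → List (Int × Int) → List (Int × Int)
  | [], _, _, _, acc => acc
  | s :: rest, inP, start, pos, acc =>
    if pvNonblank s then
      let start' := if inP == false then pos else start
      let pos' := pos + (s.length : Int) + 1
      let acc' := if rest.isEmpty then acc ++ [(start', pos' - 1)] else acc
      pvLoopA rest true start' pos' acc'
    else
      let acc' := if inP == true then acc ++ [(start, pos - 1)] else acc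
      let pos' := pos + (s.length : Int) + 1
      pvLoopA rest false start pos' acc'

def get_paragraphs_index (text : String) : List (Int × Int) :=
  pvLoopA (PySem.Chars.splitOn text.toList ['\n']) false 0 0 []

-- ===== PORT B =====
-- P = [0]; for line in lines: P.append(P[-1] + len(line) + 1)
def pvPrefixB : Int → List (List Char) → List Int
  | pos, [] => [pos]
  | pos, l :: ls => pos :: pvPrefixB (pos + (l.length : Int) + 1) ls

-- the groupby loop: each step consumes one maximal run of equal-key lines of length k,
-- emits (P[i], P[i+k]-1) when the key is truthy, and advances i by k
def pvGroupB (P : List Int) : List (List Char) → Nat → List (Int × Int)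
  | [], _ => []
  | s :: rest, i =>
    let f := pvNonblank s
    let k := 1 + (rest.takeWhile (fun t => pvNonblank t == f)).length
    let tail := rest.dropWhile (fun t => pvNonblank t == f)
    (if f then [(P.getD i 0, P.getD (i + k) 0 - 1)] else []) ++ pvGroupB P tail (i + k)
termination_by ls _ => ls.length
decreasing_by
  have := List.length_dropWhile_le (fun t => pvNonblank t == f) rest
  simp only [tail] at *
  simp
  omega

def get_paragraphs_index_alt (text : String) : List (Int × Int) :=
  let lines := PySem.Chars.splitOn text.toList ['\n']
  pvGroupB (pvPrefixB 0 lines) lines 0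

-- ===== PRECONDITION & SPEC =====
def Spec_get_paragraphs_index (text : String) (out : List (Int × Int)) : Prop := out = get_paragraphs_index_alt text
instance (text : String) (out : List (Int × Int)) : Decidable (Spec_get_paragraphs_index text out) := by unfold Spec_get_paragraphs_index; infer_instance

-- ===== CLAIM (what is proved, stated in full; the proofs are below) =====
def Claim_equal_get_paragraphs_index : Prop := ∀ (text : String), Dom_get_paragraphs_index text → Spec_get_paragraphs_index text (get_paragraphs_index text)

-- ===== LEMMAS AND PROOFS =====

-- sum of len(line)+1 over a list of lines
def pvSum (ls : List (List Char)) : Int := (ls.map (fun l => (l.length : Int) + 1)).sum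

theorem pvSum_nil : pvSum [] = 0 := rfl

theorem pvSum_cons (l : List Char) (ls : List (List Char)) :
    pvSum (l :: ls) = (l.length : Int) + 1 + pvSum ls := by
  simp [pvSum]

theorem pvPrefixB_getD (ls : List (List Char)) : ∀ (pos : Int) (j : Nat), j ≤ ls.length →
    (pvPrefixB pos ls).getD j 0 = pos + pvSum (ls.take j) := by
  induction ls with
  | nil =>
    intro pos j hj
    have hj0 : j = 0 := Nat.le_zero.mp hj
    subst hj0
    simp [pvPrefixB, pvSum]
  | cons l ls ih =>
    intro pos j hj
    cases j with
    | zero => simp [pvPrefixB, pvSum]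
    | succ j =>
      simp only [pvPrefixB, List.getD_cons_succ, List.take_succ_cons, pvSum_cons]
      rw [ih _ j (by simpa using hj)]
      ring

theorem pvTakeWhile_take {α : Type} (p : α → Bool) (l : List α) :
    l.take (l.takeWhile p).length = l.takeWhile p := by
  induction l with
  | nil => simp
  | cons x xs ih =>
    by_cases h : p x
    · simp [List.takeWhile_cons, h, ih]
    · simp [List.takeWhile_cons, h]

theorem pvGroupB_nil (P : List Int) (i : Nat) : pvGroupB P [] i = [] := by
  rw [pvGroupB]

theorem pvGroupB_cons (P : List Int) (s : List Char) (rest : List (List Char)) (i : Nat) :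
    pvGroupB P (s :: rest) i =
      (if pvNonblank s then
        [(P.getD i 0,
          P.getD (i + (1 + (rest.takeWhile (fun t => pvNonblank t == pvNonblank s)).length)) 0 - 1)]
       else []) ++
      pvGroupB P (rest.dropWhile (fun t => pvNonblank t == pvNonblank s))
        (i + (1 + (rest.takeWhile (fun t => pvNonblank t == pvNonblank s)).length)) := by
  rw [pvGroupB]

theorem pvGroupB_false (P : List Int) (s : List Char) (rest : List (List Char)) (i : Nat)
    (hs : pvNonblank s = false) :
    pvGroupB P (s :: rest) i = pvGroupB P rest (i + 1) := by
  cases rest with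
  | nil => simp [pvGroupB_cons, pvGroupB_nil, hs]
  | cons t rest' =>
    by_cases ht : pvNonblank t
    · rw [pvGroupB_cons]
      simp [hs, ht, List.takeWhile_cons, List.dropWhile_cons]
    · rw [pvGroupB_cons P s (t :: rest'), pvGroupB_cons P t rest']
      simp only [hs, ht, List.takeWhile_cons, List.dropWhile_cons, Bool.false_eq_true,
        beq_iff_eq, if_false, if_true, List.length_cons, List.nil_append]
      congr 1
      omega

-- the combined invariant: A's loop from the "outside a paragraph" / "inside a paragraph"
-- state equals the grouped form, given that P holds the prefix offsets from index i on
theorem pvMain (P : List Int) (rest : List (List Char)) : ∀ (i : Nat) (pos start : Int)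
    (acc : List (Int × Int))
    (hP : ∀ j, j ≤ rest.length → P.getD (i + j) 0 = pos + pvSum (rest.take j)),
    (pvLoopA rest false start pos acc = acc ++ pvGroupB P rest i) ∧
    (pvLoopA rest true start pos acc =
      if rest = [] then acc
      else acc ++ [(start, pos + pvSum (rest.takeWhile (fun t => pvNonblank t == true)) - 1)]
        ++ pvGroupB P (rest.dropWhile (fun t => pvNonblank t == true))
             (i + (rest.takeWhile (fun t => pvNonblank t == true)).length)) := by
  induction rest with
  | nil =>
    intro i pos start acc hP
    constructor
    · simp [pvLoopA, pvGroupB]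
    · simp [pvLoopA]
  | cons s rest ih =>
    intro i pos start acc hP
    have hP' : ∀ j, j ≤ rest.length →
        P.getD (i + 1 + j) 0 = (pos + (s.length : Int) + 1) + pvSum (rest.take j) := by
      intro j hj
      have := hP (j + 1) (by simpa using hj)
      rw [show i + (j + 1) = i + 1 + j by omega] at this
      rw [this]
      simp [List.take_succ_cons, pvSum_cons]
      ring
    have ihF := fun start' acc' => (ih (i + 1) (pos + (s.length : Int) + 1) start' acc' hP').1
    have ihT := fun start' acc' => (ih (i + 1) (pos + (s.length : Int) + 1) start' acc' hP').2
    by_cases hs : pvNonblank s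
    · -- non-blank line
      have hsB : pvNonblank s = true := hs
      constructor
      · -- FALSE state
        rw [pvLoopA]
        simp only [hs, if_pos, Bool.not_eq_true]
        cases rest with
        | nil =>
          simp only [List.isEmpty_nil, if_true, beq_self_eq_true]
          rw [ihT pos (acc ++ [(pos, pos + (s.length : Int) + 1 - 1)])]
          rw [pvGroupB]
          simp only [hsB, if_pos, List.takeWhile_nil, List.dropWhile_nil, pvGroupB]
          have h0 := hP 0 (by simp)
          have h1 := hP 1 (by simp)
          simp [pvSum] at h0 h1
          simp [h0, h1]
          omega
        | cons t rest' =>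
          simp only [List.isEmpty_cons, Bool.false_eq_true, if_false, beq_self_eq_true, if_true]
          rw [ihT pos acc]
          rw [if_neg (by simp : ¬(t :: rest' = []))]
          rw [pvGroupB]
          simp only [hsB, if_pos]
          have h0 := hP 0 (by simp)
          simp only [Nat.add_zero, List.take_zero, pvSum_nil, add_zero] at h0
          have hk : 1 + ((t :: rest').takeWhile (fun u => pvNonblank u == true)).length
              ≤ (s :: t :: rest').length := by
            have := (List.takeWhile_sublist (l := t :: rest')
              (p := fun u => pvNonblank u == true)).length_le
            simp only [List.length_cons] at *
            omega
          have hPk := hP (1 + ((t :: rest').takeWhile (fun u => pvNonblank u == true)).length) hk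
          rw [hPk]
          have htake : (s :: t :: rest').take
              (1 + ((t :: rest').takeWhile (fun u => pvNonblank u == true)).length)
              = s :: ((t :: rest').takeWhile (fun u => pvNonblank u == true)) := by
            rw [show 1 + ((t :: rest').takeWhile (fun u => pvNonblank u == true)).length
                = ((t :: rest').takeWhile (fun u => pvNonblank u == true)).length + 1 by omega]
            simp only [List.take_succ_cons]
            rw [pvTakeWhile_take]
          rw [htake, pvSum_cons, h0]
          simp only [List.append_assoc]
          have e1 : pos + (s.length : Int) + 1 +
                pvSum (List.takeWhile (fun u => pvNonblank u == true) (t :: rest')) - 1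
              = pos + ((s.length : Int) + 1 +
                pvSum (List.takeWhile (fun u => pvNonblank u == true) (t :: rest'))) - 1 := by ring
          have e2 : i + 1 + (List.takeWhile (fun u => pvNonblank u == true) (t :: rest')).length
              = i + (1 + (List.takeWhile (fun u => pvNonblank u == true) (t :: rest')).length) := by
            omega
          rw [e1, e2]
      · -- TRUE state
        rw [pvLoopA]
        simp only [hs, if_pos]
        have hfalse : (if (true : Bool) == false then pos else start) = start := by simp
        rw [hfalse]
        cases rest with
        | nil =>
          simp only [List.isEmpty_nil, if_true]
          rw [ihT start (acc ++ [(start, pos + (s.length : Int) + 1 - 1)])]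
          simp only [if_pos rfl]
          simp [List.takeWhile_cons, hsB, pvSum_cons, pvSum_nil, List.dropWhile_cons, pvGroupB]
          ring_nf
        | cons t rest' =>
          simp only [List.isEmpty_cons, Bool.false_eq_true, if_false]
          rw [ihT start acc]
          rw [if_neg (by simp : ¬(t :: rest' = []))]
          rw [if_neg (by simp : ¬(s :: t :: rest' = []))]
          rw [List.takeWhile_cons_of_pos (p := fun t => pvNonblank t == true)
              (a := s) (l := t :: rest') (by simp [hsB]),
            List.dropWhile_cons_of_pos (p := fun t => pvNonblank t == true)
              (a := s) (l := t :: rest') (by simp [hsB]), pvSum_cons]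
          simp only [List.length_cons]
          have e1 : pos + (s.length : Int) + 1 +
                pvSum (List.takeWhile (fun t => pvNonblank t == true) (t :: rest')) - 1
              = pos + ((s.length : Int) + 1 +
                pvSum (List.takeWhile (fun t => pvNonblank t == true) (t :: rest'))) - 1 := by ring
          have e2 : i + 1 + (List.takeWhile (fun t => pvNonblank t == true) (t :: rest')).length
              = i + ((List.takeWhile (fun t => pvNonblank t == true) (t :: rest')).length + 1) := by
            omega
          rw [e1, e2]
    · -- blank line
      have hsB : pvNonblank s = false := by simpa using hs
      constructor
      · rw [pvLoopA]
        simp only [hs, Bool.false_eq_true, if_false]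
        rw [if_neg (by simp : ¬((false == true) = true))]
        rw [ihF start acc]
        rw [pvGroupB_false P s rest i hsB]
      · rw [pvLoopA]
        simp only [hs, Bool.false_eq_true, if_false]
        rw [if_pos (by simp : (true == true) = true)]
        rw [ihF start (acc ++ [(start, pos - 1)])]
        rw [if_neg (by simp : ¬(s :: rest = []))]
        rw [List.takeWhile_cons_of_neg (by simp [hsB]),
          List.dropWhile_cons_of_neg (by simp [hsB])]
        simp [pvSum, pvGroupB_false P s rest i hsB]

-- ===== VERDICT (by name: the statement is the Claim_ definition above) =====
theorem get_paragraphs_index_spec : Claim_equal_get_paragraphs_index := by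
  intro text _
  unfold Spec_get_paragraphs_index get_paragraphs_index get_paragraphs_index_alt
  set lines := PySem.Chars.splitOn text.toList ['\n'] with hl
  have h := (pvMain (pvPrefixB 0 lines) lines 0 0 0 []
    (by intro j hj; simpa using pvPrefixB_getD lines 0 j hj)).1
  simpa using h
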